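-- pv_equiv track=rewrite | github.com/prabowo02/CP | Hofstadter-Conway-10000/hc10000.py | hofstadter_conway_10000
-- ===== SOURCE A (Python) =====
-- def C(n, k):
--     if n-k < k:
--         k = n - k
--
--     result = 1
--     for i in range(k):
--         result = result * (n-i) // (i+1)
--
--     return result
--
-- def hofstadter_conway_10000(n):
--     if n < 1:
--         return None
--
--     if n == 1 or n == 2:
--         return 1
--
--     n -= 2
--
--     log_n = 1
--     while 2**log_n < n:
--         n -= 2**log_n
--         log_n += 1
--
--     if n == 2**log_n:
--         return 2**log_n
--
--     result = 2**(log_n - 1) + 1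
--
--     log_n -= 1
--
--     dimension = 1
--     while n > 0 and log_n > 0:
--         if C(log_n + dimension, dimension) - 1 < n:
--             n -= C(log_n + dimension, dimension) - 1
--             result += C(log_n + dimension - 1, dimension)
--
--             log_n -= 1
--             dimension += 1
--
--         elif C(log_n + dimension - 1, dimension - 1) < n:
--             n -= C(log_n + dimension - 1, dimension - 1)
--             result += C(log_n + dimension - 2, dimension - 1)
--
--             log_n -= 1
--
--         else:
--             n -= 1
--             dimension -= 1
--
--     return result
-- ===== SOURCE B (Python) =====
-- def hofstadter_conway_10000(n):
--     if n < 1: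
--         return None
--     if n <= 2:
--         return 1
--     # block decomposition: n = 2**L + m with 1 <= m <= 2**L
--     L = (n - 1).bit_length() - 1
--     m = n - (1 << L)
--     if m == 1 << L:
--         return 1 << L
--     acc = (1 << (L - 1)) + 1
--     L -= 1
--     d = 1
--     b1 = L + 1   # C(L+d, d)
--     b2 = 1       # C(L+d-1, d-1)
--     while m > 0 and L > 0:
--         if b1 - 1 < m:
--             t = b1 * L // (L + d)        # C(L+d-1, d)
--             m -= b1 - 1
--             acc += t
--             b1 = b1 * L // (d + 1)       # C(L+d, d+1)
--             b2 = t
--             L -= 1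
--             d += 1
--         elif b2 < m:
--             t = b2 * L // (L + d - 1)    # C(L+d-2, d-1)
--             m -= b2
--             acc += t
--             b1 = b1 * L // (L + d)       # C(L+d-1, d)
--             b2 = t
--             L -= 1
--         else:
--             m -= 1
--             b1 = b2
--             b2 = b2 * (d - 1) // (L + d - 1)
--             d -= 1
--     return acc
-- ===== Notes on version B (the rewrite author's own statement) =====
-- stated objective: alternative
-- what changed: B finds the block 2^L < n <= 2^(L+1) with a bit_length closed form instead of A's power-subtracting loop, and replaces A's helper C (three binomial coefficients recomputed by a product loop on every descent iteration) by two binomials carried through the descent and updated in O(1) by multiplicative identities.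
import Mathlib
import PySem

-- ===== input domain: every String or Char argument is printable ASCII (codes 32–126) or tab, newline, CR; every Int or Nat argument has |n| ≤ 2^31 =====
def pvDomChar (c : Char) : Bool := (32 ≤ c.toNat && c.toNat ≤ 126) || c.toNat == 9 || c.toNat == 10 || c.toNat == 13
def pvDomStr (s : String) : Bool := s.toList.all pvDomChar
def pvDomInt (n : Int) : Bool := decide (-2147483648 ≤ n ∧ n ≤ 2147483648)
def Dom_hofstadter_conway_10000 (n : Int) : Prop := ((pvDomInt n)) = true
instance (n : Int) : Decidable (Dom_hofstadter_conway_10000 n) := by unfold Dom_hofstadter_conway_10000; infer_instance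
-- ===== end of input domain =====

-- B replaces A's power-stripping loop by a bit_length closed form and A's three
-- binomial-coefficient recomputations per iteration by two incrementally maintained
-- binomials (O(1) updates instead of product loops); same return value everywhere.

-- ===== PORT A =====
-- helper C(n, k): symmetric reduction, then the multiplicative product loop with floor division
def pyC (n k : Int) : Int :=
  let k' := if n - k < k then n - k else k
  (PySem.List.pyRange 0 k' 1).foldl (fun result i => PySem.Int.floordiv (result * (n - i)) (i + 1)) 1

-- the `while 2**log_n < n` stripping loop; fuel n.toNat is enough (n shrinks by 2^log_n ≥ 2
-- each pass).  log_n ≥ 1 throughout, so Python's 2**log_n is the integer 2 ^ log_n.toNat.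
def hcStrip : Nat → Int → Int → Int × Int
  | 0, n, log_n => (n, log_n)
  | f+1, n, log_n =>
    if 2 ^ log_n.toNat < n then hcStrip f (n - 2 ^ log_n.toNat) (log_n + 1) else (n, log_n)

-- the main descent loop of A; the measure 2*log_n + dimension decreases every iteration,
-- so the fuel passed below is enough
def hcLoopA : Nat → Int → Int → Int → Int → Int
  | 0, _, _, _, result => result
  | f+1, n, log_n, dimension, result =>
    if 0 < n ∧ 0 < log_n then
      if pyC (log_n + dimension) dimension - 1 < n then
        hcLoopA f (n - (pyC (log_n + dimension) dimension - 1)) (log_n - 1) (dimension + 1)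
          (result + pyC (log_n + dimension - 1) dimension)
      else if pyC (log_n + dimension - 1) (dimension - 1) < n then
        hcLoopA f (n - pyC (log_n + dimension - 1) (dimension - 1)) (log_n - 1) dimension
          (result + pyC (log_n + dimension - 2) (dimension - 1))
      else
        hcLoopA f (n - 1) log_n (dimension - 1) result
    else result

def hofstadter_conway_10000 (n : Int) : Option Int :=
  if n < 1 then none
  else if n = 1 ∨ n = 2 then some 1
  else
    let n1 := n - 2
    let p := hcStrip n1.toNat n1 1
    if p.1 = 2 ^ p.2.toNat then some (2 ^ p.2.toNat)
    else
      let result := 2 ^ (p.2 - 1).toNat + 1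
      let log_n' := p.2 - 1
      some (hcLoopA ((2 * log_n' + 1).toNat + 1) p.1 log_n' 1 result)

-- ===== PORT B =====
-- the descent loop of B: b1 = C(L+d, d) and b2 = C(L+d-1, d-1) are carried along and
-- updated in O(1); same fuel shape as the loop it replaces (measure 2*L + d decreases)
def hcLoopB : Nat → Int → Int → Int → Int → Int → Int → Int
  | 0, _, _, _, acc, _, _ => acc
  | f+1, m, L, d, acc, b1, b2 =>
    if 0 < m ∧ 0 < L then
      if b1 - 1 < m then
        let t := PySem.Int.floordiv (b1 * L) (L + d)
        hcLoopB f (m - (b1 - 1)) (L - 1) (d + 1) (acc + t) (PySem.Int.floordiv (b1 * L) (d + 1)) t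
      else if b2 < m then
        let t := PySem.Int.floordiv (b2 * L) (L + d - 1)
        hcLoopB f (m - b2) (L - 1) d (acc + t) (PySem.Int.floordiv (b1 * L) (L + d)) t
      else
        hcLoopB f (m - 1) L (d - 1) acc b2 (PySem.Int.floordiv (b2 * (d - 1)) (L + d - 1))
    else acc

def hofstadter_conway_10000_alt (n : Int) : Option Int :=
  if n < 1 then none
  else if n ≤ 2 then some 1
  else
    let L : Int := (PySem.Int.bitLength (n - 1) : Int) - 1   -- (n-1).bit_length() - 1
    let m := n - 2 ^ L.toNat                                 -- n - (1 << L); L ≥ 1 here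
    if m = 2 ^ L.toNat then some (2 ^ L.toNat)
    else
      let acc := 2 ^ (L - 1).toNat + 1
      let L1 := L - 1
      some (hcLoopB ((2 * L1 + 1).toNat + 1) m L1 1 acc (L1 + 1) 1)

-- ===== PRECONDITION & SPEC =====
def Spec_hofstadter_conway_10000 (n : Int) (out : Option Int) : Prop := out = hofstadter_conway_10000_alt n
instance (n : Int) (out : Option Int) : Decidable (Spec_hofstadter_conway_10000 n out) := by unfold Spec_hofstadter_conway_10000; infer_instance

-- ===== CLAIM (what is proved, stated in full; the proofs are below) =====
def Claim_equal_hofstadter_conway_10000 : Prop := ∀ (n : Int), Dom_hofstadter_conway_10000 n → Spec_hofstadter_conway_10000 n (hofstadter_conway_10000 n)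

-- ===== LEMMAS AND PROOFS =====

-- The product loop of C equals the binomial coefficient.
lemma foldC_eq_choose (n : Int) (j : Nat) (hj : (j : Int) ≤ n) :
    (PySem.List.pyRange 0 (j : Int) 1).foldl
      (fun result i => PySem.Int.floordiv (result * (n - i)) (i + 1)) 1
      = (n.toNat.choose j : Int) := by
  induction j with
  | zero => simp [PySem.List.pyRange_one_eq_nil (by omega : (0:Int) ≤ 0)]
  | succ j ih =>
    have hj' : (j : Int) ≤ n := by push_cast at hj ⊢; omega
    have hcast : ((j : Nat) : Int) + 1 = ((j + 1 : Nat) : Int) := by push_cast; ring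
    rw [← hcast, PySem.List.pyRange_one_succ_right (by positivity), List.foldl_append, ih hj']
    simp only [List.foldl]
    have hjn : j + 1 ≤ n.toNat := by omega
    have hmul : (n.toNat.choose j : Int) * (n - j) = (n.toNat.choose (j+1) : Int) * ((j:Int) + 1) := by
      have h1 : n.toNat.choose (j+1) * (j+1) = n.toNat.choose j * (n.toNat - j) := Nat.choose_succ_right_eq _ _
      have h2 : n - (j : Int) = ((n.toNat - j : Nat) : Int) := by omega
      rw [h2, ← Nat.cast_mul, ← h1]; push_cast; ring
    rw [hmul, PySem.Int.floordiv_eq_ediv_of_pos (by omega), Int.mul_ediv_cancel _ (by omega)]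

lemma pyC_eq_choose (n k : Int) (h0 : 0 ≤ k) (h : k ≤ n) :
    pyC n k = (n.toNat.choose k.toNat : Int) := by
  unfold pyC
  by_cases hc : n - k < k
  · simp only [if_pos hc]
    have h1 : n - k = ((n - k).toNat : Int) := by omega
    rw [h1, foldC_eq_choose n _ (by omega)]
    congr 1
    have heq : (n-k).toNat = n.toNat - k.toNat := by omega
    rw [heq, Nat.choose_symm (by omega)]
  · simp only [if_neg hc]
    have h1 : k = ((k).toNat : Int) := by omega
    rw [h1, foldC_eq_choose n _ (by omega)]
    congr 2 <;> omega

lemma pyC_zero (a : Int) (ha : 0 ≤ a) : pyC a 0 = 1 := by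
  rw [pyC_eq_choose a 0 le_rfl ha]; simp

lemma pyC_one (a : Int) (ha : 0 ≤ a) : pyC (a + 1) 1 = a + 1 := by
  rw [pyC_eq_choose (a+1) 1 (by omega) (by omega)]
  simp [Nat.choose_one_right]; omega

-- incremental-update identities for the maintained binomials
lemma pyC_id1 (a b : Int) (ha : 1 ≤ a) (hb : 0 ≤ b) :
    pyC (a + b) (b + 1) = PySem.Int.floordiv (pyC (a + b) b * a) (b + 1) := by
  rw [pyC_eq_choose (a+b) (b+1) (by omega) (by omega), pyC_eq_choose (a+b) b (by omega) (by omega),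
      show (b+1).toNat = b.toNat + 1 by omega]
  have hN : (a+b).toNat - b.toNat = a.toNat := by omega
  have h1 : (a+b).toNat.choose (b.toNat+1) * (b.toNat+1) = (a+b).toNat.choose b.toNat * a.toNat := by
    rw [Nat.choose_succ_right_eq, hN]
  have hmul : ((a+b).toNat.choose b.toNat : Int) * a = ((a+b).toNat.choose (b.toNat+1) : Int) * (b + 1) := by
    have hcast := congrArg (fun x : Nat => (x : Int)) h1
    push_cast at hcast
    have haa : ((a.toNat : Int)) = a := by omega
    have hbb : ((b.toNat : Int)) = b := by omega
    rw [haa, hbb] at hcast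
    linarith [hcast]
  rw [hmul, PySem.Int.floordiv_eq_ediv_of_pos (by omega), Int.mul_ediv_cancel _ (by omega)]

lemma pyC_id2 (a b : Int) (ha : 1 ≤ a) (hb : 0 ≤ b) :
    pyC (a + b - 1) b = PySem.Int.floordiv (pyC (a + b) b * a) (a + b) := by
  rw [pyC_eq_choose (a+b-1) b (by omega) (by omega), pyC_eq_choose (a+b) b (by omega) (by omega),
      show (a+b-1).toNat = (a+b).toNat - 1 by omega]
  have hsucc := Nat.succ_mul_choose_eq ((a+b).toNat - 1) b.toNat
  simp only [Nat.succ_eq_add_one] at hsucc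
  rw [show (a+b).toNat - 1 + 1 = (a+b).toNat by omega] at hsucc
  have hright := Nat.choose_succ_right_eq (a+b).toNat b.toNat
  have hid : (a+b).toNat * ((a+b).toNat - 1).choose b.toNat
      = (a+b).toNat.choose b.toNat * a.toNat := by
    rw [hsucc, hright]; congr 1; omega
  have hmul : ((a+b).toNat.choose b.toNat : Int) * a
      = (((a+b).toNat - 1).choose b.toNat : Int) * (a + b) := by
    have hcast := congrArg (fun x : Nat => (x : Int)) hid
    push_cast at hcast
    have haa : ((a.toNat : Int)) = a := by omega
    have hab : (((a+b).toNat : Int)) = a + b := by omega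
    rw [haa, hab] at hcast
    linarith [hcast]
  rw [hmul, PySem.Int.floordiv_eq_ediv_of_pos (by omega), Int.mul_ediv_cancel _ (by omega)]

lemma pyC_id3 (a b : Int) (ha : 1 ≤ a) (hb : 1 ≤ b) :
    pyC (a + b - 1) (b - 1) = PySem.Int.floordiv (pyC (a + b) b * b) (a + b) := by
  rw [pyC_eq_choose (a+b-1) (b-1) (by omega) (by omega), pyC_eq_choose (a+b) b (by omega) (by omega),
      show (a+b-1).toNat = (a+b).toNat - 1 by omega, show (b-1).toNat = b.toNat - 1 by omega]
  have hsucc := Nat.succ_mul_choose_eq ((a+b).toNat - 1) (b.toNat - 1)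
  simp only [Nat.succ_eq_add_one] at hsucc
  rw [show (a+b).toNat - 1 + 1 = (a+b).toNat by omega,
      show b.toNat - 1 + 1 = b.toNat by omega] at hsucc
  have hmul : ((a+b).toNat.choose b.toNat : Int) * b
      = (((a+b).toNat - 1).choose (b.toNat - 1) : Int) * (a + b) := by
    have hcast := congrArg (fun x : Nat => (x : Int)) hsucc
    push_cast at hcast
    have hbb : ((b.toNat : Int)) = b := by omega
    have hab : (((a+b).toNat : Int)) = a + b := by omega
    rw [hbb, hab] at hcast
    linarith [hcast]
  rw [hmul, PySem.Int.floordiv_eq_ediv_of_pos (by omega), Int.mul_ediv_cancel _ (by omega)]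

-- characterization of the stripping loop
lemma hcStrip_spec : ∀ (f : Nat) (n log_n : Int), 0 < n → 0 < log_n → n.toNat ≤ f →
    (hcStrip f n log_n).1 + 2 ^ (hcStrip f n log_n).2.toNat = n + 2 ^ log_n.toNat ∧
    0 < (hcStrip f n log_n).1 ∧
    (hcStrip f n log_n).1 ≤ 2 ^ (hcStrip f n log_n).2.toNat ∧
    log_n ≤ (hcStrip f n log_n).2 := by
  intro f
  induction f with
  | zero => intro n log_n hn _ hf; omega
  | succ f ih =>
    intro n log_n hn hl hf
    rw [hcStrip]
    by_cases hc : 2 ^ log_n.toNat < n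
    · simp only [if_pos hc]
      have h2 : (2:Int) ≤ 2 ^ log_n.toNat := by
        calc (2:Int) = 2 ^ 1 := by norm_num
        _ ≤ 2 ^ log_n.toNat := by
            apply pow_le_pow_right₀ (by norm_num) (by omega)
      obtain ⟨h1', h2', h3', h4'⟩ := ih (n - 2 ^ log_n.toNat) (log_n + 1) (by omega) (by omega) (by omega)
      have hlt : (log_n + 1).toNat = log_n.toNat + 1 := by omega
      rw [hlt] at h1'
      rw [pow_succ] at h1'
      refine ⟨by omega, h2', h3', by omega⟩
    · simp only [if_neg hc]
      exact ⟨by trivial, hn, by omega, le_rfl⟩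

-- the two descent loops run in lockstep
lemma lockstep : ∀ (f : Nat) (m L d acc b1 b2 : Int), 0 ≤ d →
    b1 = pyC (L + d) d → (1 ≤ d → b2 = pyC (L + d - 1) (d - 1)) →
    hcLoopA f m L d acc = hcLoopB f m L d acc b1 b2 := by
  intro f
  induction f with
  | zero => intro m L d acc b1 b2 _ _ _; rfl
  | succ f ih =>
    intro m L d acc b1 b2 hd hb1 hb2
    subst hb1
    rw [hcLoopA, hcLoopB]
    by_cases hg : 0 < m ∧ 0 < L
    · simp only [if_pos hg]
      obtain ⟨hm, hL⟩ := hg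
      by_cases hc1 : pyC (L + d) d - 1 < m
      · rw [if_pos hc1, if_pos hc1,
            show pyC (L + d - 1) d = PySem.Int.floordiv (pyC (L + d) d * L) (L + d) from
              pyC_id2 L d hL hd]
        refine ih _ _ _ _ _ _ (by omega) ?_ (fun _ => ?_)
        · rw [show L - 1 + (d + 1) = L + d by ring]
          exact (pyC_id1 L d hL hd).symm
        · rw [show L - 1 + (d + 1) - 1 = L + d - 1 by ring, show d + 1 - 1 = d by ring]
          exact (pyC_id2 L d hL hd).symm
      · have hd1 : 1 ≤ d := by
          by_contra hdc
          have hd0 : d = 0 := by omega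
          apply hc1
          rw [hd0, add_zero, pyC_zero L (by omega)]
          omega
        have hb2' := hb2 hd1
        subst hb2'
        rw [if_neg hc1, if_neg hc1]
        by_cases hc2 : pyC (L + d - 1) (d - 1) < m
        · rw [if_pos hc2, if_pos hc2,
              show pyC (L + d - 2) (d - 1)
                  = PySem.Int.floordiv (pyC (L + d - 1) (d - 1) * L) (L + d - 1) from by
                rw [show L + d - 2 = L + (d - 1) - 1 by ring,
                    show L + d - 1 = L + (d - 1) by ring]
                exact pyC_id2 L (d - 1) hL (by omega)]
          refine ih _ _ _ _ _ _ hd ?_ (fun _ => ?_)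
          · rw [show L - 1 + d = L + d - 1 by ring]
            exact (pyC_id2 L d hL hd).symm
          · rw [show L - 1 + d - 1 = L + (d - 1) - 1 by ring,
                show L + d - 1 = L + (d - 1) by ring]
            exact (pyC_id2 L (d - 1) hL (by omega)).symm
        · rw [if_neg hc2, if_neg hc2]
          refine ih _ _ _ _ _ _ (by omega) ?_ (fun hdd => ?_)
          · rw [show L + (d - 1) = L + d - 1 by ring]
          · have e6 := pyC_id3 L (d - 1) hL (by omega)
            rw [show L + (d - 1) = L + d - 1 by ring] at e6
            rw [show L + (d - 1) - 1 = L + d - 1 - 1 by ring, e6]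
    · simp only [if_neg hg]

-- ===== VERDICT (by name: the statement is the Claim_ definition above) =====
theorem hofstadter_conway_10000_spec : Claim_equal_hofstadter_conway_10000 := by
  intro n _
  unfold Spec_hofstadter_conway_10000
  unfold hofstadter_conway_10000 hofstadter_conway_10000_alt
  by_cases h1 : n < 1
  · simp [h1]
  · by_cases h2 : n = 1 ∨ n = 2
    · simp only [if_neg h1, if_pos h2, if_pos (show n ≤ 2 by omega)]
    · have h3 : 3 ≤ n := by omega
      simp only [if_neg h1, if_neg h2, if_neg (show ¬ n ≤ 2 by omega)]
      obtain ⟨hQ, hpos, hle, hlog⟩ := hcStrip_spec (n-2).toNat (n-2) 1 (by omega) (by omega) le_rfl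
      set p := hcStrip (n-2).toNat (n-2) 1 with hp
      set t := p.2.toNat with ht
      have hQ' : p.1 + 2 ^ t = n := by
        have h11 : ((1:Int)).toNat = 1 := by omega
        rw [h11] at hQ
        have : (2:Int) ^ 1 = 2 := by norm_num
        omega
      have hbl1 := PySem.Int.lt_two_pow_bitLength (n-1)
      have hbl2 := PySem.Int.two_pow_bitLength_le (n-1) (by omega)
      set bl := PySem.Int.bitLength (n-1) with hbldef
      have habs : (n-1).natAbs = (n-1).toNat := by omega
      rw [habs] at hbl1 hbl2
      have cX : (((2:Nat) ^ t : Nat) : Int) = 2 ^ t := by push_cast; ring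
      have cY : (((2:Nat) ^ (t+1) : Nat) : Int) = 2 ^ (t+1) := by push_cast; ring
      have hYX : (2:Nat) ^ (t+1) = 2 ^ t * 2 := by rw [pow_succ]
      have cY' : ((2:Int) ^ (t+1)) = 2 ^ t * 2 := by rw [pow_succ]
      have hub : (n-1).toNat < 2 ^ (t+1) := by omega
      have hlb : (2:Nat) ^ t ≤ (n-1).toNat := by omega
      have h5 : t < bl := by
        by_contra hcc
        push_neg at hcc
        have := Nat.pow_le_pow_right (show 1 ≤ 2 by norm_num) hcc
        omega
      have h6 : bl - 1 ≤ t := by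
        by_contra hcc
        push_neg at hcc
        have := Nat.pow_le_pow_right (show 1 ≤ 2 by norm_num) (show t + 1 ≤ bl - 1 by omega)
        omega
      have hblt : bl = t + 1 := by omega
      have hL : (bl : Int) - 1 = p.2 := by
        rw [hblt]; push_cast; omega
      rw [hL]
      have hmm : n - 2 ^ p.2.toNat = p.1 := by rw [← ht]; omega
      rw [hmm]
      by_cases hfin : p.1 = 2 ^ p.2.toNat
      · rw [if_pos hfin, if_pos hfin]
      · rw [if_neg hfin, if_neg hfin]
        congr 1
        refine lockstep _ _ _ _ _ _ _ (by omega) ?_ (fun _ => ?_)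
        · rw [pyC_one (p.2 - 1) (by omega)]
        · rw [show p.2 - 1 + 1 - 1 = p.2 - 1 by ring, show (1:Int) - 1 = 0 by ring,
              pyC_zero (p.2 - 1) (by omega)]
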